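-- pv_equiv track=rewrite | github.com/OliviaChinYu/AdventofCode | 2015/Day11/AoC_2015_Day11.py | condition_3
-- ===== SOURCE A (Python) =====
-- def condition_3(input_list):
-- 	dupe_count = []
-- 	letter = input_list[0]
-- 	count = 0
-- 	for i in input_list:
-- 		if i == letter:
-- 			count += 1
-- 		else:
-- 			letter = i
-- 			count = 1
-- 		if count == 2:
-- 			dupe_count.append(letter)
-- 	cond3 = len(dupe_count) > 1
-- 	return cond3
-- ===== SOURCE B (Python) =====
-- def condition_3(input_list):
--     runs = 0
--     i, n = 0, len(input_list)
--     while i < n: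
--         j = i + 1
--         while j < n and input_list[j] == input_list[i]:
--             j += 1
--         if j - i >= 2:
--             runs += 1
--         i = j
--     return runs > 1
-- ===== Notes on version B (the rewrite author's own statement) =====
-- stated objective: alternative
-- what changed: Replaces A's stateful letter/count fold (appending when the count hits 2) by a two-pointer scan that advances over each maximal run and counts runs of length >= 2.
import Mathlib
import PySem

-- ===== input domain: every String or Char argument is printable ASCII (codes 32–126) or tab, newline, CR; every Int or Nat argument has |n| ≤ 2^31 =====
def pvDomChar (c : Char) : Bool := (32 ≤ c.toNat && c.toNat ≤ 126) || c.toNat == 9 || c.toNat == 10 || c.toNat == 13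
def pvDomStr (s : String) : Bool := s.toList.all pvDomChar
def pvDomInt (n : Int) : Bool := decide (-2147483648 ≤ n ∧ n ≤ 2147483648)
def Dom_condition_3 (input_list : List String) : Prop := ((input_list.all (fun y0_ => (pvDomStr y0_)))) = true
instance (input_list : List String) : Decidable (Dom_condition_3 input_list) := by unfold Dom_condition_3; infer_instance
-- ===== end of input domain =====

-- B replaces A's stateful letter/count fold by a two-pointer maximal-run scan counting runs of length ≥ 2 (alternative decomposition, same cost).


-- ===== PORT A =====
-- A's loop body: state (dupe_count, letter, count); append letter when count hits exactly 2.
def condStepA (st : List String × String × Int) (i : String) : List String × String × Int :=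
  let d := st.1
  let letter := st.2.1
  let count := st.2.2
  let lc : String × Int := if i == letter then (letter, count + 1) else (i, 1)
  let d' := if lc.2 == 2 then d ++ [lc.1] else d
  (d', lc.1, lc.2)

def condition_3 (input_list : List String) : Bool :=
  match input_list with
  | [] => false   -- A raises IndexError here (input_list[0]); excluded by Pre_condition_3
  | x :: _ =>
    let st := input_list.foldl condStepA ([], x, (0 : Int))
    decide (st.1.length > 1)

-- ===== PORT B =====
-- inner while loop of B: consume the maximal run of x, return (run length incl. x, remainder)
def splitRun (x : String) : List String → Nat × List String
  | [] => (1, [])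
  | y :: ys => if y == x then ((splitRun x ys).1 + 1, (splitRun x ys).2) else (1, y :: ys)

theorem splitRun_snd_le (x : String) (l : List String) : (splitRun x l).2.length ≤ l.length := by
  induction l with
  | nil => simp [splitRun]
  | cons y ys ih =>
    simp only [splitRun]
    split
    · exact le_trans ih (Nat.le_succ _)
    · simp

-- outer while loop of B: count maximal runs of length ≥ 2
def countRuns : List String → Nat
  | [] => 0
  | x :: xs =>
    (if 2 ≤ (splitRun x xs).1 then 1 else 0) + countRuns (splitRun x xs).2
termination_by l => l.length
decreasing_by exact Nat.lt_succ_of_le (splitRun_snd_le x xs)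

def condition_3_alt (input_list : List String) : Bool :=
  decide (countRuns input_list > 1)

-- ===== PRECONDITION & SPEC =====
-- A raises IndexError on the empty list (input_list[0]); Pre_ excludes exactly that input.
def Pre_condition_3 (input_list : List String) : Prop := input_list ≠ []
instance (input_list : List String) : Decidable (Pre_condition_3 input_list) := by unfold Pre_condition_3; infer_instance
def pvWitness_condition_3 : List String := (["a", "a", "b", "b", "c"])

def Spec_condition_3 (input_list : List String) (out : Bool) : Prop := out = condition_3_alt input_list
instance (input_list : List String) (out : Bool) : Decidable (Spec_condition_3 input_list out) := by unfold Spec_condition_3; infer_instance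

-- ===== CLAIM (what is proved, stated in full; the proofs are below) =====
def Claim_equal_condition_3 : Prop := ∀ (input_list : List String), Dom_condition_3 input_list → Pre_condition_3 input_list → Spec_condition_3 input_list (condition_3 input_list)

-- ===== LEMMAS AND PROOFS =====

theorem splitRun_fst_pos (x : String) (l : List String) : 1 ≤ (splitRun x l).1 := by
  induction l with
  | nil => simp [splitRun]
  | cons y ys ih =>
    simp only [splitRun]
    split <;> simp

-- main invariant, proved by strong induction on the list length:
-- (1) from a fresh state (letter = y just seen once, count = 1), the fold adds exactly
--     countRuns (y :: ys) elements to the dupe list;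
-- (2) from a saturated state (count ≥ 2), the fold skips the rest of the current run and
--     then adds countRuns of the remainder.
theorem condA_invariant (n : Nat) :
    (∀ (ys : List String), ys.length = n → ∀ (y : String) (d : List String),
      (ys.foldl condStepA (d, y, (1 : Int))).1.length = d.length + countRuns (y :: ys)) ∧
    (∀ (zs : List String), zs.length = n → ∀ (y : String) (d : List String) (c : Int), 2 ≤ c →
      (zs.foldl condStepA (d, y, c)).1.length = d.length + countRuns (splitRun y zs).2) := by
  induction n using Nat.strong_induction_on with
  | _ n ih =>
    constructor
    · intro ys hlen y d
      cases ys with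
      | nil => simp [countRuns, splitRun]
      | cons z zs =>
        simp only [List.length_cons] at hlen
        have hzs : zs.length < n := by omega
        by_cases hz : z = y
        · subst hz
          have hstep : condStepA (d, z, (1 : Int)) z = (d ++ [z], z, 2) := by
            simp [condStepA]
          rw [List.foldl_cons, hstep]
          rw [((ih zs.length hzs).2 zs rfl z (d ++ [z]) 2 (le_refl 2))]
          have hcr : countRuns (z :: z :: zs)
              = 1 + countRuns (splitRun z zs).2 := by
            rw [countRuns]
            have h1 := splitRun_fst_pos z zs
            simp only [splitRun, beq_self_eq_true, if_true]
            rw [if_pos (by omega)]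
          rw [hcr]
          simp
          omega
        · have hne : (z == y) = false := by simp [hz]
          have hstep : condStepA (d, y, (1 : Int)) z = (d, z, 1) := by
            simp [condStepA, hne]
          rw [List.foldl_cons, hstep]
          rw [((ih zs.length hzs).1 zs rfl z d)]
          have hcr : countRuns (y :: z :: zs) = countRuns (z :: zs) := by
            rw [countRuns]
            simp [splitRun, hne]
          rw [hcr]
    · intro zs hlen y d c hc
      cases zs with
      | nil => simp [splitRun, countRuns]
      | cons w ws =>
        simp only [List.length_cons] at hlen
        have hws : ws.length < n := by omega
        by_cases hw : w = y
        · subst hw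
          have hstep : condStepA (d, w, c) w = (d, w, c + 1) := by
            have h2 : ¬ ((c + 1 : Int) = 2) := by omega
            simp [condStepA, h2]
          rw [List.foldl_cons, hstep]
          rw [((ih ws.length hws).2 ws rfl w d (c + 1) (by omega))]
          simp [splitRun]
        · have hne : (w == y) = false := by simp [hw]
          have hstep : condStepA (d, y, c) w = (d, w, 1) := by
            simp [condStepA, hne]
          rw [List.foldl_cons, hstep]
          rw [((ih ws.length hws).1 ws rfl w d)]
          simp [splitRun, hne]

-- ===== VERDICT (by name: the statement is the Claim_ definition above) =====
theorem condition_3_spec : Claim_equal_condition_3 := by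
  intro input_list _ hpre
  unfold Spec_condition_3
  match input_list with
  | [] => exact absurd rfl hpre
  | x :: xs =>
    unfold condition_3 condition_3_alt
    have hstep : condStepA ([], x, (0 : Int)) x = ([], x, 1) := by
      simp [condStepA]
    have hinv := (condA_invariant xs.length).1 xs rfl x []
    simp only [List.foldl_cons, hstep] at *
    rw [hinv]
    simp
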